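-- pv_equiv track=rewrite | github.com/hshk99/Autopack | src/autopack/repo_scanner.py | _build_directory_map
-- ===== SOURCE A (Python) =====
-- from typing import Dict, List, Optional
--
-- def _build_directory_map(
--     tree: Dict, anchor_files: Dict[str, List[str]]
-- ) -> Dict[str, List[str]]:
--     """
--     Build directory → category hints map.
--
--     Uses anchor files to infer which directories belong
--     to which categories.
--     """
--
--     directory_map = {}
--
--     for category, anchors in anchor_files.items():
--         for anchor in anchors:
--             anchor_clean = anchor.rstrip("/")
--
--             # All dirs under anchor belong to this category
--             for dir_path in tree.keys():
--                 if dir_path.startswith(anchor_clean):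
--                     directory_map.setdefault(dir_path, []).append(category)
--
--     return directory_map
-- ===== SOURCE B (Python) =====
-- def _build_directory_map(tree, anchor_files):
--     # Flatten the anchor table once, then classify: list the matched
--     # directories (in first-match order), and give each one the categories
--     # of every pair whose cleaned anchor is a prefix of it.
--     pairs = [(category, anchor.rstrip("/"))
--              for category, anchors in anchor_files.items()
--              for anchor in anchors]
--     matched = dict.fromkeys(d for _, a in pairs for d in tree if d.startswith(a))
--     return {d: [c for c, a in pairs if d.startswith(a)] for d in matched}
-- ===== Notes on version B (the rewrite author's own statement) =====
-- stated objective: simpler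
-- what changed: A mutates a dict via setdefault/append inside a triple nested loop; B flattens the (category, cleaned-anchor) pairs once, collects the matched directories with dict.fromkeys, and computes each directory's full category list in one comprehension over the pairs; Pre_ excludes association lists with duplicate keys, which encode no Python dict input.
import Mathlib
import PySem

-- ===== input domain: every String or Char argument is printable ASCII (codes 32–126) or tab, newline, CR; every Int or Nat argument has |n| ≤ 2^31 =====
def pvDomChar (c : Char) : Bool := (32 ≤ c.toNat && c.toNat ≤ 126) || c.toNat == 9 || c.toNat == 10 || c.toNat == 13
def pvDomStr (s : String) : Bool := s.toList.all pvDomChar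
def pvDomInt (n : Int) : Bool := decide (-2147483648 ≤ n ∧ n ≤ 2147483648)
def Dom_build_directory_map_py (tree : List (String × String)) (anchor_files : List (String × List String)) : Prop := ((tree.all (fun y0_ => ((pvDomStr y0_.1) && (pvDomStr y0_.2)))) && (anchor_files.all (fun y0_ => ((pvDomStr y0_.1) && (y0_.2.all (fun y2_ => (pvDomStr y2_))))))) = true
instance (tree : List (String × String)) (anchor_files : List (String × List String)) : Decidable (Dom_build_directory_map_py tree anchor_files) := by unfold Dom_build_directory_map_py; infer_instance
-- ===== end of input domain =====

-- B replaces A's triple loop with setdefault/append mutation by a flatten-then-classify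
-- decomposition (flattened anchor pairs, matched keys deduped in first-match order, one
-- comprehension per key); objective: simpler, same exact result.

-- shared primitive (PySem has no rstrip with a chars argument): s.rstrip("/"),
-- i.e. drop all trailing '/' characters — exact on every string.
def pvRstripSlash (s : String) : String :=
  String.ofList ((s.toList.reverse.dropWhile (fun c => c == '/')).reverse)

-- ===== PORT A =====
def build_directory_map_py (tree : List (String × String)) (anchor_files : List (String × List String)) : List (String × List String) :=
  (anchor_files.foldl (fun d ca =>
      ca.2.foldl (fun d anchor =>
        let anchor_clean := pvRstripSlash anchor
        tree.foldl (fun d kv =>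
          if PySem.Str.startswith kv.1 anchor_clean then
            -- directory_map.setdefault(dir_path, []).append(category)
            d.modify kv.1 [] (fun l => l ++ [ca.1])
          else d) d) d)
    (PySem.Dict.empty : PySem.Dict String (List String))).items

-- ===== PORT B =====
def build_directory_map_py_alt (tree : List (String × String)) (anchor_files : List (String × List String)) : List (String × List String) :=
  let pairs : List (String × String) :=
    anchor_files.flatMap (fun ca => ca.2.map (fun anchor => (ca.1, pvRstripSlash anchor)))
  -- dict.fromkeys(...) : the matched directories, deduplicated, in first-match order
  let matched : List String :=
    PySem.Set.ofList (pairs.flatMap (fun p =>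
      (tree.map Prod.fst).filter (fun d => PySem.Str.startswith d p.2)))
  -- {d: [c for c, a in pairs if d.startswith(a)] for d in matched}
  (matched.foldl (fun dm d =>
      dm.insert d ((pairs.filter (fun p => PySem.Str.startswith d p.2)).map Prod.fst))
    (PySem.Dict.empty : PySem.Dict String (List String))).items

-- ===== PRECONDITION & SPEC =====
-- Pre_ excludes association lists whose keys repeat: `tree` and `anchor_files` are Python
-- dicts, whose keys are necessarily distinct, so a duplicate-key list encodes no dict input
-- that the Python function could ever receive.
def Pre_build_directory_map_py (tree : List (String × String)) (anchor_files : List (String × List String)) : Prop :=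
  (tree.map Prod.fst).Nodup ∧ (anchor_files.map Prod.fst).Nodup
instance (tree : List (String × String)) (anchor_files : List (String × List String)) : Decidable (Pre_build_directory_map_py tree anchor_files) := by unfold Pre_build_directory_map_py; infer_instance

def pvWitness_build_directory_map_py : (List (String × String)) × (List (String × List String)) :=
  ([("src/a", "d"), ("docs", "e")], [("code", ["src/"]), ("doc", ["docs"])])

def Spec_build_directory_map_py (tree : List (String × String)) (anchor_files : List (String × List String)) (out : List (String × List String)) : Prop := out = build_directory_map_py_alt tree anchor_files
instance (tree : List (String × String)) (anchor_files : List (String × List String)) (out : List (String × List String)) : Decidable (Spec_build_directory_map_py tree anchor_files out) := by unfold Spec_build_directory_map_py; infer_instance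

-- ===== CLAIM (what is proved, stated in full; the proofs are below) =====
def Claim_equal_build_directory_map_py : Prop := ∀ (tree : List (String × String)) (anchor_files : List (String × List String)), Dom_build_directory_map_py tree anchor_files → Pre_build_directory_map_py tree anchor_files → Spec_build_directory_map_py tree anchor_files (build_directory_map_py tree anchor_files)

-- ===== LEMMAS AND PROOFS =====

-- proof-side abbreviations
def pvMatch (k : String) (p : String × String) : Bool := PySem.Str.startswith k p.2
def pvPairs (anchor_files : List (String × List String)) : List (String × String) :=
  anchor_files.flatMap (fun ca => ca.2.map (fun anchor => (ca.1, pvRstripSlash anchor)))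
def pvCats (P : List (String × String)) (k : String) : List String :=
  (P.filter (pvMatch k)).map Prod.fst
def pvE (tree : List (String × String)) (P : List (String × String)) : List (String × String) :=
  P.flatMap (fun p => (tree.filter (fun kv => pvMatch kv.1 p)).map (fun kv => (kv.1, p.1)))
def pvKs (keys : List String) (P : List (String × String)) : List String :=
  P.flatMap (fun p => keys.filter (fun k => pvMatch k p))

lemma pv_flatMap_if {α β : Type} (p : α → Bool) (g : α → β) (l : List α) :
    l.flatMap (fun a => if p a then [g a] else []) = (l.filter p).map g := by
  induction l with
  | nil => rfl
  | cons a t ih => by_cases h : p a <;> simp [h, ih]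

lemma pv_mem_dd (keys : List String) (P : List (String × String)) (k : String) :
    k ∈ PySem.Set.ofList (pvKs keys P) ↔ k ∈ keys ∧ pvCats P k ≠ [] := by
  rw [PySem.Set.mem_ofList]
  unfold pvKs pvCats
  simp only [List.mem_flatMap, List.mem_filter, ne_eq, List.map_eq_nil_iff, List.filter_eq_nil_iff]
  push Not
  constructor
  · rintro ⟨p, hp, hk, hm⟩; exact ⟨hk, ⟨p, hp, by simp [hm]⟩⟩
  · rintro ⟨hk, p, hp, hm⟩; exact ⟨p, hp, hk, by simpa using hm⟩

-- A's nested loops, rewritten as one fold of setdefault/append steps over the match events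
lemma pv_A_eq (tree : List (String × String)) (anchor_files : List (String × List String)) :
    build_directory_map_py tree anchor_files
      = ((pvE tree (pvPairs anchor_files)).foldl
          (fun d q => d.modify q.1 [] (fun l => l ++ [q.2]))
          (PySem.Dict.empty : PySem.Dict String (List String))).items := by
  unfold build_directory_map_py pvE pvPairs
  simp only [List.foldl_flatMap, List.foldl_map, List.foldl_filter, pvMatch]

lemma pv_E_map_fst (tree : List (String × String)) (P : List (String × String)) :
    (pvE tree P).map Prod.fst = pvKs (tree.map Prod.fst) P := by
  unfold pvE pvKs
  rw [List.map_flatMap]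
  congr 1
  funext p
  rw [List.filter_map]
  simp [Function.comp_def]

-- the value stored at a key k equals B's category list for k
lemma pv_cats_eq (tree : List (String × String)) (P : List (String × String))
    (hk : (tree.map Prod.fst).Nodup) (k : String) (hmem : k ∈ tree.map Prod.fst) :
    ((pvE tree P).filter (fun q => q.1 == k)).map Prod.snd = pvCats P k := by
  unfold pvE pvCats
  rw [List.filter_flatMap, List.map_flatMap, ← pv_flatMap_if (pvMatch k) Prod.fst P]
  congr 1
  funext p
  rw [List.filter_map]
  simp only [List.map_map]
  have hcomp : ((fun q : String × String => q.1 == k) ∘ (fun kv : String × String => (kv.1, p.1)))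
      = fun kv : String × String => kv.1 == k := rfl
  rw [hcomp]
  by_cases hm : pvMatch k p
  · rw [List.filter_filter]
    have hpred : List.filter (fun kv : String × String => (kv.1 == k) && pvMatch kv.1 p) tree
        = List.filter (fun kv : String × String => kv.1 == k) tree := by
      apply List.filter_congr
      intro kv _
      by_cases he : kv.1 = k
      · subst he; simp [hm]
      · simp [he]
    rw [hpred]
    have hlen : (List.filter (fun kv : String × String => kv.1 == k) tree).length = 1 := by
      rw [← List.countP_eq_length_filter]
      have : List.countP (fun kv : String × String => kv.1 == k) tree
          = List.count k (tree.map Prod.fst) := by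
        rw [List.count, List.countP_map]; rfl
      rw [this, List.count_eq_one_of_mem hk hmem]
    obtain ⟨x, hx⟩ := List.length_eq_one_iff.mp hlen
    rw [hx]
    simp [hm]
  · have hnil : List.filter (fun kv : String × String => kv.1 == k)
        (List.filter (fun kv : String × String => pvMatch kv.1 p) tree) = [] := by
      rw [List.filter_eq_nil_iff]
      intro kv hkv hbeq
      have h1 : pvMatch kv.1 p = true := (List.mem_filter.mp hkv).2
      have h2 : kv.1 = k := by simpa using hbeq
      exact hm (h2 ▸ h1)
    rw [hnil]
    simp [hm]

-- A's result, in closed form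
lemma pv_A_items (tree : List (String × String)) (anchor_files : List (String × List String))
    (hk : (tree.map Prod.fst).Nodup) :
    build_directory_map_py tree anchor_files
      = (PySem.Set.ofList (pvKs (tree.map Prod.fst) (pvPairs anchor_files))).map
          (fun k => (k, pvCats (pvPairs anchor_files) k)) := by
  rw [pv_A_eq]
  set P := pvPairs anchor_files with hP
  set D := (pvE tree P).foldl (fun d q => d.modify q.1 [] (fun l => l ++ [q.2]))
      (PySem.Dict.empty : PySem.Dict String (List String)) with hD
  have hkeysD : D.keys = PySem.Set.ofList (pvKs (tree.map Prod.fst) P) := by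
    rw [hD, PySem.Dict.keys_foldl_modify_key (pvE tree P) Prod.fst []
      (fun _ q => (fun l => l ++ [q.2]))]
    rw [pv_E_map_fst]
    rfl
  have hnd : D.keys.Nodup := by
    rw [hD]
    exact PySem.Dict.nodup_keys_foldl_modify_key (pvE tree P) Prod.fst []
      (fun _ q => (fun l => l ++ [q.2])) _ List.nodup_nil
  rw [PySem.Dict.items_eq_map_keys D hnd [], hkeysD]
  apply List.map_congr_left
  intro k hkm
  have hkmem : k ∈ tree.map Prod.fst := ((pv_mem_dd _ P k).mp hkm).1
  have hgetD : D.getD k [] = ((pvE tree P).filter (fun q => q.1 == k)).map Prod.snd := by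
    rw [hD, PySem.Dict.getD_foldl_modify_append]
    rfl
  rw [hgetD, pv_cats_eq tree P hk k hkmem]

-- B's result, in the same closed form: the insert loop runs over fresh distinct keys
lemma pv_B_items (tree : List (String × String)) (anchor_files : List (String × List String)) :
    build_directory_map_py_alt tree anchor_files
      = (PySem.Set.ofList (pvKs (tree.map Prod.fst) (pvPairs anchor_files))).map
          (fun k => (k, pvCats (pvPairs anchor_files) k)) := by
  unfold build_directory_map_py_alt
  rw [PySem.Dict.items_foldl_insert_fresh]
  · rfl
  · intro a _; rfl
  · simpa using PySem.Set.nodup_ofList _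

-- ===== VERDICT (by name: the statement is the Claim_ definition above) =====
theorem build_directory_map_py_spec : Claim_equal_build_directory_map_py := by
  intro tree anchor_files _ hpre
  unfold Spec_build_directory_map_py
  rw [pv_A_items tree anchor_files hpre.1, pv_B_items tree anchor_files]
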